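-- pv_equiv track=rewrite | github.com/EECS-NTNU/hilp | scripts/generate_workload_functions.py | generate_compatibility_array
-- ===== SOURCE A (Python) =====
-- def generate_compatibility_array(n_cpus, n_machines, WLP_TEST):
--     compatibility_array = []
--
--     # Task ID 0
--     tmp = []
--     for i in range(n_machines):
--         if i < n_cpus:
--             tmp.append(1)
--         else:
--             tmp.append(0)
--     compatibility_array.append(tmp)
--
--     # Task ID 1
--     tmp = []
--     for i in range(n_machines):
--         if i == 0:
--             # Don't allow CPUs to execute kernels for WLP Tests.
--             if WLP_TEST:
--                 tmp.append(0)
--             else: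
--                 tmp.append(1)
--         elif i < n_cpus:
--             tmp.append(0)
--         else:
--             tmp.append(1)
--         #tmp.append(1)
--     compatibility_array.append(tmp)
--
--     # Task ID 2
--     tmp = []
--     for i in range(n_machines):
--         if i < n_cpus:
--             tmp.append(1)
--         else:
--             tmp.append(0)
--     compatibility_array.append(tmp)
--
--     return compatibility_array
-- ===== SOURCE B (Python) =====
-- def generate_compatibility_array(n_cpus, n_machines, WLP_TEST):
--     # closed-form block construction instead of per-index loops
--     k = max(0, min(n_cpus, n_machines))
--     edge = [1] * k + [0] * (n_machines - k)
--     if n_machines <= 0: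
--         kernel = []
--     else:
--         kernel = ([0] if WLP_TEST else [1]) + [0] * (k - 1) + [1] * (n_machines - max(k, 1))
--     return [edge, kernel, edge]
-- ===== Notes on version B (the rewrite author's own statement) =====
-- stated objective: simpler
-- what changed: Replaces the three per-index append loops with closed-form block construction: each row is assembled from replicated [1]/[0] blocks whose lengths are computed from k = max(0, min(n_cpus, n_machines)).
import Mathlib
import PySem

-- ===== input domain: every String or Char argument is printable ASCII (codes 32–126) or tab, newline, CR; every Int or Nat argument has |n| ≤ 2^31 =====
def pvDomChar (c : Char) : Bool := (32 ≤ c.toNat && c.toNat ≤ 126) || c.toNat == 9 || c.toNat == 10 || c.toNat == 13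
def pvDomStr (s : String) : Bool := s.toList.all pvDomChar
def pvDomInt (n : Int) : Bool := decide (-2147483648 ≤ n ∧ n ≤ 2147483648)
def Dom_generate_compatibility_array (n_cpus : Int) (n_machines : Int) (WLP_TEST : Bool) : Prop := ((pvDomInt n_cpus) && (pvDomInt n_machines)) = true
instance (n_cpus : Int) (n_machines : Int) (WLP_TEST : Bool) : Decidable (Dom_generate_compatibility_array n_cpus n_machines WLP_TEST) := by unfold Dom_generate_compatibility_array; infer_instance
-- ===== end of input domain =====

-- B replaces A's three per-index loops with closed-form block construction (rows assembled from replicated 0/1 blocks); objective: simpler.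

-- ===== PORT A =====
def generate_compatibility_array (n_cpus : Int) (n_machines : Int) (WLP_TEST : Bool) : List (List Int) :=
  -- Task ID 0
  let tmp0 := (PySem.List.pyRange 0 n_machines 1).foldl
    (fun tmp i => if i < n_cpus then tmp ++ [1] else tmp ++ [0]) []
  -- Task ID 1
  let tmp1 := (PySem.List.pyRange 0 n_machines 1).foldl
    (fun tmp i =>
      if i = 0 then (if WLP_TEST then tmp ++ [0] else tmp ++ [1])
      else if i < n_cpus then tmp ++ [0] else tmp ++ [1]) []
  -- Task ID 2
  let tmp2 := (PySem.List.pyRange 0 n_machines 1).foldl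
    (fun tmp i => if i < n_cpus then tmp ++ [1] else tmp ++ [0]) []
  [tmp0, tmp1, tmp2]

-- ===== PORT B =====
-- Int.toNat clamps a negative count to 0, exactly like Python's `[x] * n` for n ≤ 0.
def generate_compatibility_array_alt (n_cpus : Int) (n_machines : Int) (WLP_TEST : Bool) : List (List Int) :=
  let k := max 0 (min n_cpus n_machines)
  let edge := List.replicate k.toNat 1 ++ List.replicate (n_machines - k).toNat 0
  let kernel :=
    if n_machines ≤ 0 then []
    else (if WLP_TEST then [(0 : Int)] else [1]) ++ List.replicate (k - 1).toNat 0
           ++ List.replicate (n_machines - max k 1).toNat 1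
  [edge, kernel, edge]

-- ===== PRECONDITION & SPEC =====
def Spec_generate_compatibility_array (n_cpus : Int) (n_machines : Int) (WLP_TEST : Bool) (out : List (List Int)) : Prop := out = generate_compatibility_array_alt n_cpus n_machines WLP_TEST
instance (n_cpus : Int) (n_machines : Int) (WLP_TEST : Bool) (out : List (List Int)) : Decidable (Spec_generate_compatibility_array n_cpus n_machines WLP_TEST out) := by unfold Spec_generate_compatibility_array; infer_instance

-- ===== CLAIM (what is proved, stated in full; the proofs are below) =====
def Claim_equal_generate_compatibility_array : Prop := ∀ (n_cpus : Int) (n_machines : Int) (WLP_TEST : Bool), Dom_generate_compatibility_array n_cpus n_machines WLP_TEST → Spec_generate_compatibility_array n_cpus n_machines WLP_TEST (generate_compatibility_array n_cpus n_machines WLP_TEST)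

-- ===== LEMMAS AND PROOFS =====

-- A's edge row (tasks 0 and 2) over range m equals two replicated blocks.
theorem row_edge (nc : Int) (m : Nat) :
    (List.range m).map (fun (k : Nat) => if ((k : Int)) < nc then (1 : Int) else 0)
    = List.replicate (max 0 (min nc (m : Int))).toNat 1
      ++ List.replicate ((m : Int) - max 0 (min nc (m : Int))).toNat 0 := by
  apply List.ext_getElem
  · simp; omega
  · intro i h1 h2
    have hi : i < m := by simpa using h1
    rw [List.getElem_map, List.getElem_range]
    by_cases hc : (i : Int) < nc
    · rw [if_pos hc, List.getElem_append_left (by simp; omega)]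
      exact (List.getElem_replicate _).symm
    · rw [if_neg hc, List.getElem_append_right (by simp; omega)]
      exact (List.getElem_replicate _).symm

-- A's kernel row (task 1) over range m equals head-cell + two replicated blocks.
theorem row_kernel (nc : Int) (W : Bool) (m : Nat) :
    (List.range m).map (fun (k : Nat) =>
        if ((k : Int)) = 0 then (if W then (0 : Int) else 1)
        else if ((k : Int)) < nc then 0 else 1)
    = (if (m : Int) ≤ 0 then []
       else (if W then [(0 : Int)] else [1])
            ++ List.replicate (max 0 (min nc (m : Int)) - 1).toNat 0
            ++ List.replicate ((m : Int) - max (max 0 (min nc (m : Int))) 1).toNat 1) := by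
  by_cases hm : m = 0
  · subst hm; simp
  · rw [if_neg (show ¬((m:Int) ≤ 0) by omega)]
    apply List.ext_getElem
    · rcases W <;> simp <;> omega
    · intro i h1 h2
      have hi : i < m := by simpa using h1
      rw [List.getElem_map, List.getElem_range]
      by_cases h0 : i = 0
      · subst h0
        rcases W <;> simp
      · rw [if_neg (by exact_mod_cast h0)]
        by_cases hc : (i : Int) < nc
        · rw [if_pos hc,
              List.getElem_append_left (by rcases W <;> simp <;> omega),
              List.getElem_append_right (by rcases W <;> simp <;> omega)]
          rcases W <;> simp
        · rw [if_neg hc,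
              List.getElem_append_right (by rcases W <;> simp <;> omega)]
          rcases W <;> simp

-- a foldl that appends one element per step is a map
theorem foldl_append_map {α β : Type} (g : α → β) (xs : List α) (init : List β) :
    xs.foldl (fun acc x => acc ++ [g x]) init = init ++ xs.map g := by
  induction xs generalizing init with
  | nil => simp
  | cons x xs ih => simp [List.foldl_cons, ih]

theorem fold_pyRange_map (f : Int → Int) (nm : Int) :
    ((PySem.List.pyRange 0 nm 1).foldl (fun tmp i => tmp ++ [f i]) [])
    = (List.range nm.toNat).map (fun (k : Nat) => f (k : Int)) := by
  rw [foldl_append_map, PySem.List.pyRange_one]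
  simp [List.map_map, Function.comp_def]

theorem main_eq (nc nm : Int) (W : Bool) :
    generate_compatibility_array nc nm W = generate_compatibility_array_alt nc nm W := by
  unfold generate_compatibility_array generate_compatibility_array_alt
  have hf0 : (fun (tmp : List Int) (i : Int) => if i < nc then tmp ++ [(1:Int)] else tmp ++ [0])
      = fun tmp i => tmp ++ [if i < nc then 1 else 0] := by
    funext tmp i; split <;> rfl
  have hf1 : (fun (tmp : List Int) (i : Int) =>
        if i = 0 then (if W then tmp ++ [(0:Int)] else tmp ++ [1])
        else if i < nc then tmp ++ [0] else tmp ++ [1])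
      = fun tmp i => tmp ++ [if i = 0 then (if W then 0 else 1) else if i < nc then 0 else 1] := by
    funext tmp i; split
    · split <;> rfl
    · split <;> rfl
  rw [hf0, hf1, fold_pyRange_map, fold_pyRange_map, row_edge, row_kernel]
  rcases le_or_gt nm 0 with h | h
  · have h2 : nm.toNat = 0 := by omega
    simp [h2, h]
  · have h2 : ((nm.toNat : Int)) = nm := by omega
    rw [h2]

-- ===== VERDICT (by name: the statement is the Claim_ definition above) =====
theorem generate_compatibility_array_spec : Claim_equal_generate_compatibility_array := by
  intro nc nm W _
  exact main_eq nc nm W
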